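-- pv_equiv track=rewrite | github.com/uustortoise/Beta_6 | backend/elderlycare_v1_16/profile/validator.py | check_drug_interactions
-- ===== SOURCE A (Python) =====
-- from typing import Dict, List, Any, Optional, Tuple
--
-- def check_drug_interactions(medications: List[Dict[str, Any]]) -> List[str]:
--     """
--     Check for potential drug interactions.
--
--     Args:
--         medications: List of medication dictionaries
--
--     Returns:
--         List of interaction warnings
--     """
--     warnings = []
--
--     # Common interaction patterns (simplified)
--     drug_classes = {}
--     for med in medications:
--         name = med.get('name', '').lower()
--         # Simplified classification
--         if any(word in name for word in ['warfarin', 'coumadin']):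
--             drug_classes['anticoagulant'] = drug_classes.get('anticoagulant', 0) + 1
--         if any(word in name for word in ['aspirin', 'ibuprofen', 'naproxen']):
--             drug_classes['nsaid'] = drug_classes.get('nsaid', 0) + 1
--         if any(word in name for word in ['lisinopril', 'enalapril', 'ramipril']):
--             drug_classes['ace_inhibitor'] = drug_classes.get('ace_inhibitor', 0) + 1
--
--     # Check interactions
--     if 'anticoagulant' in drug_classes and 'nsaid' in drug_classes:
--         warnings.append("⚠️ NSAID with anticoagulant: Increased bleeding risk")
--
--     if drug_classes.get('nsaid', 0) > 1:
--         warnings.append("⚠️ Multiple NSAIDs: Increased GI and renal risk")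
--
--     return warnings
-- ===== SOURCE B (Python) =====
-- def check_drug_interactions(medications):
--     """Same result as A: two direct scans instead of a class-counter dict."""
--     warnings = []
--     anticoagulant_present = any(
--         any(word in med.get('name', '').lower() for word in ['warfarin', 'coumadin'])
--         for med in medications)
--     nsaid_count = sum(
--         1 for med in medications
--         if any(word in med.get('name', '').lower()
--                for word in ['aspirin', 'ibuprofen', 'naproxen']))
--     if anticoagulant_present and nsaid_count >= 1:
--         warnings.append("⚠️ NSAID with anticoagulant: Increased bleeding risk")
--     if nsaid_count > 1:
--         warnings.append("⚠️ Multiple NSAIDs: Increased GI and renal risk")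
--     return warnings
-- ===== Notes on version B (the rewrite author's own statement) =====
-- stated objective: simpler
-- what changed: Replaced the counter-dict over three drug classes (including the never-used ace_inhibitor tally) with two direct scans: an any() for anticoagulant presence and a sum() counting NSAIDs, then the same two warning appends.
import Mathlib
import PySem

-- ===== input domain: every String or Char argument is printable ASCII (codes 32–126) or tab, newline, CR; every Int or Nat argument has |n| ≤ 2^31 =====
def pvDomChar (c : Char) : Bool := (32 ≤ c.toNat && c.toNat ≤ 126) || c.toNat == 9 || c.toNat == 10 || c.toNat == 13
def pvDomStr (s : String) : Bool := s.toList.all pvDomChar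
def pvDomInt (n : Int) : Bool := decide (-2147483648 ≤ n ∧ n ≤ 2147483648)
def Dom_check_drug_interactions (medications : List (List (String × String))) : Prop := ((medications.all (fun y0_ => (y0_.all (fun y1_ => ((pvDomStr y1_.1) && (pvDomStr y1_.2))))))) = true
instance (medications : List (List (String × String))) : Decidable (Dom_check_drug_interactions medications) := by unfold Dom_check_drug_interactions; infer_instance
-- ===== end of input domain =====

-- B drops A's class-counter dict (and its unused ace_inhibitor tally) for two direct scans: simpler, same result.


-- ===== PORT A =====
-- one iteration of A's classification loop over drug_classes
def cdi_classify (d : PySem.Dict String Int) (med : List (String × String)) : PySem.Dict String Int :=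
  let name := PySem.Str.lower (PySem.Dict.getD (PySem.Dict.mk med) "name" "")
  let d := if ["warfarin", "coumadin"].any (fun word => PySem.Str.isIn word name) then
             d.insert "anticoagulant" (d.getD "anticoagulant" 0 + 1) else d
  let d := if ["aspirin", "ibuprofen", "naproxen"].any (fun word => PySem.Str.isIn word name) then
             d.insert "nsaid" (d.getD "nsaid" 0 + 1) else d
  if ["lisinopril", "enalapril", "ramipril"].any (fun word => PySem.Str.isIn word name) then
    d.insert "ace_inhibitor" (d.getD "ace_inhibitor" 0 + 1) else d

def check_drug_interactions (medications : List (List (String × String))) : List String :=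
  let drug_classes := medications.foldl cdi_classify PySem.Dict.empty
  let warnings : List String := []
  let warnings := if drug_classes.contains "anticoagulant" && drug_classes.contains "nsaid" then
    warnings ++ ["⚠️ NSAID with anticoagulant: Increased bleeding risk"] else warnings
  if drug_classes.getD "nsaid" 0 > 1 then
    warnings ++ ["⚠️ Multiple NSAIDs: Increased GI and renal risk"] else warnings

-- ===== PORT B =====
def cdi_isAnticoagulant (med : List (String × String)) : Bool :=
  ["warfarin", "coumadin"].any (fun word =>
    PySem.Str.isIn word (PySem.Str.lower (PySem.Dict.getD (PySem.Dict.mk med) "name" "")))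

def cdi_isNsaid (med : List (String × String)) : Bool :=
  ["aspirin", "ibuprofen", "naproxen"].any (fun word =>
    PySem.Str.isIn word (PySem.Str.lower (PySem.Dict.getD (PySem.Dict.mk med) "name" "")))

def check_drug_interactions_alt (medications : List (List (String × String))) : List String :=
  let warnings : List String := []
  let anticoagulant_present := medications.any cdi_isAnticoagulant
  let nsaid_count : Int := (medications.countP cdi_isNsaid : Int)
  let warnings := if anticoagulant_present && nsaid_count ≥ 1 then
    warnings ++ ["⚠️ NSAID with anticoagulant: Increased bleeding risk"] else warnings
  if nsaid_count > 1 then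
    warnings ++ ["⚠️ Multiple NSAIDs: Increased GI and renal risk"] else warnings

-- ===== PRECONDITION & SPEC =====
def Spec_check_drug_interactions (medications : List (List (String × String))) (out : List String) : Prop := out = check_drug_interactions_alt medications
instance (medications : List (List (String × String))) (out : List String) : Decidable (Spec_check_drug_interactions medications out) := by unfold Spec_check_drug_interactions; infer_instance

-- ===== CLAIM (what is proved, stated in full; the proofs are below) =====
def Claim_equal_check_drug_interactions : Prop := ∀ (medications : List (List (String × String))), Dom_check_drug_interactions medications → Spec_check_drug_interactions medications (check_drug_interactions medications)

-- ===== LEMMAS AND PROOFS =====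
-- invariant of A's classification loop: what the dict says about the two keys the checks read
theorem cdi_fold_inv (meds : List (List (String × String))) (d : PySem.Dict String Int) :
    (meds.foldl cdi_classify d).contains "anticoagulant"
        = (d.contains "anticoagulant" || meds.any cdi_isAnticoagulant)
    ∧ (meds.foldl cdi_classify d).contains "nsaid"
        = (d.contains "nsaid" || meds.any cdi_isNsaid)
    ∧ (meds.foldl cdi_classify d).getD "nsaid" 0
        = d.getD "nsaid" 0 + (meds.countP cdi_isNsaid : Int) := by
  induction meds generalizing d with
  | nil => simp
  | cons m t ih =>
    obtain ⟨ih1, ih2, ih3⟩ := ih (cdi_classify d m)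
    refine ⟨?_, ?_, ?_⟩ <;>
      simp only [List.foldl_cons, List.any_cons, List.countP_cons,
        cdi_classify, cdi_isAnticoagulant, cdi_isNsaid] <;>
      split_ifs <;>
      simp_all [PySem.Dict.contains_insert, PySem.Dict.getD_insert] <;>
      ring

theorem check_drug_interactions_spec : Claim_equal_check_drug_interactions := by
  intro meds _
  show check_drug_interactions meds = check_drug_interactions_alt meds
  obtain ⟨h1, h2, h3⟩ := cdi_fold_inv meds PySem.Dict.empty
  simp only [check_drug_interactions, check_drug_interactions_alt, h1, h2, h3,
    PySem.Dict.contains_empty, PySem.Dict.getD_empty, Bool.false_or, zero_add]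
  by_cases h : meds.any cdi_isNsaid = true
  · have h1le : (1 : Int) ≤ (meds.countP cdi_isNsaid : Int) := by
      rw [List.any_eq_true] at h
      have := List.countP_pos_iff.mpr h
      omega
    simp [h, h1le]
  · have hc0 : meds.countP cdi_isNsaid = 0 := by
      rw [List.countP_eq_zero]
      intro x hx
      exact fun hb => h (List.any_eq_true.mpr ⟨x, hx, hb⟩)
    simp [h, hc0]
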